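-- pv_equiv track=rewrite | github.com/PetitCoinCoin/advent-of-code | 2020/day_10.py | identify_sub_chains
-- ===== SOURCE A (Python) =====
-- def identify_sub_chains(chain: list) -> list:
--     result = []
--     start = 0
--     i = 0
--     for i in range(len(chain) - 1):
--         if chain[i + 1] - chain[i] == 1:
--             continue
--         result.append(chain[i] + 1 - start)
--         start = chain[i + 1]
--     result.append(chain[-1] + 1 - start)
--     return result
-- ===== SOURCE B (Python) =====
-- def identify_sub_chains(chain: list) -> list:
--     # Two passes: materialize the runs of consecutive-by-1 values, then map runs to lengths.
--     runs = [[chain[0]]]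
--     for prev, cur in zip(chain, chain[1:]):
--         if cur - prev == 1:
--             runs[-1].append(cur)
--         else:
--             runs.append([cur])
--     # first run is measured from the implicit 0 floor; later runs from their own start
--     return [runs[0][-1] + 1] + [r[-1] - r[0] + 1 for r in runs[1:]]
-- ===== Notes on version B (the rewrite author's own statement) =====
-- stated objective: alternative
-- what changed: Instead of A's single scan that accumulates lengths while tracking a running start value, B first materializes the runs of consecutive-by-1 values as an explicit list of sublists, then a second pass maps each run to its length (the first run measured from the implicit 0 floor).
import Mathlib
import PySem

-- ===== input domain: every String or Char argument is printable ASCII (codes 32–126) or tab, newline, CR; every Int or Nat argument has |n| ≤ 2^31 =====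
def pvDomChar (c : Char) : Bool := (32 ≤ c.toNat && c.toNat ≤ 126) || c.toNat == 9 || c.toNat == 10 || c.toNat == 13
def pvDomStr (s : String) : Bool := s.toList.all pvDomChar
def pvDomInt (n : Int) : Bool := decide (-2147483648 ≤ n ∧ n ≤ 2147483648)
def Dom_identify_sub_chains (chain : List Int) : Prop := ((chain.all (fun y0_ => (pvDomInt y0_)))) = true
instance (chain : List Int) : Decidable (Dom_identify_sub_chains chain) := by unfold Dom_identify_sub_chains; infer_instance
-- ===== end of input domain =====

-- B materializes the runs of consecutive-by-1 values as an explicit list of sublists and maps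
-- runs to lengths in a second pass (alternative decomposition, same O(n) cost).

-- ===== PORT A =====
def identify_sub_chains (chain : List Int) : List Int :=
  let st := (PySem.List.pyRange 0 (PySem.List.len chain - 1) 1).foldl
    (fun (st : List Int × Int) i =>
      if PySem.List.pyGetD chain (i + 1) 0 - PySem.List.pyGetD chain i 0 == 1 then st
      else (st.1 ++ [PySem.List.pyGetD chain i 0 + 1 - st.2], PySem.List.pyGetD chain (i + 1) 0))
    ([], 0)
  st.1 ++ [PySem.List.pyGetD chain (-1) 0 + 1 - st.2]

-- ===== PORT B =====
def identify_sub_chains_alt (chain : List Int) : List Int :=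
  match chain with
  | [] => []   -- Python B raises IndexError here (chain[0]); excluded by Pre_
  | c :: rest =>
    let runs := ((c :: rest).zip rest).foldl
      (fun (runs : List (List Int)) pq =>
        if pq.2 - pq.1 == 1 then runs.dropLast ++ [runs.getLastD [] ++ [pq.2]]
        else runs ++ [[pq.2]]) [[c]]
    (PySem.List.pyGetD (runs.headD []) (-1) 0 + 1)
      :: (runs.drop 1).map (fun r => PySem.List.pyGetD r (-1) 0 - PySem.List.pyGetD r 0 0 + 1)

-- ===== PRECONDITION & SPEC =====
-- Pre_ excludes only the empty list, on which both Pythons raise IndexError (chain[-1] / chain[0]).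
def Pre_identify_sub_chains (chain : List Int) : Prop := chain ≠ []
instance (chain : List Int) : Decidable (Pre_identify_sub_chains chain) := by unfold Pre_identify_sub_chains; infer_instance
def pvWitness_identify_sub_chains : List Int := [1, 2, 3, 6, 7]
def Spec_identify_sub_chains (chain : List Int) (out : List Int) : Prop := out = identify_sub_chains_alt chain
instance (chain : List Int) (out : List Int) : Decidable (Spec_identify_sub_chains chain out) := by unfold Spec_identify_sub_chains; infer_instance

-- ===== CLAIM (what is proved, stated in full; the proofs are below) =====
def Claim_equal_identify_sub_chains : Prop := ∀ (chain : List Int), Dom_identify_sub_chains chain → Pre_identify_sub_chains chain → Spec_identify_sub_chains chain (identify_sub_chains chain)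

-- ===== LEMMAS AND PROOFS =====

-- A's loop body, as a fold over adjacent pairs
def foldAp (pairs : List (Int × Int)) (st : List Int × Int) : List Int × Int :=
  pairs.foldl (fun st p => if p.2 - p.1 == 1 then st else (st.1 ++ [p.1 + 1 - st.2], p.2)) st

-- B's run-building loop
def foldB (pairs : List (Int × Int)) (runs : List (List Int)) : List (List Int) :=
  pairs.foldl (fun runs pq =>
    if pq.2 - pq.1 == 1 then runs.dropLast ++ [runs.getLastD [] ++ [pq.2]]
    else runs ++ [[pq.2]]) runs

-- the per-run output: first run measured from 0, later runs from their own start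
def outP (rs : List (List Int)) : List Int :=
  match rs with
  | [] => []
  | r0 :: t => (r0.getLastD 0 + 1) :: t.map (fun r => r.getLastD 0 - r.headD 0 + 1)

theorem outP_concat (rs : List (List Int)) (r : List Int) :
    outP (rs ++ [r]) = outP rs ++ [r.getLastD 0 + 1 - (if rs = [] then 0 else r.headD 0)] := by
  cases rs with
  | nil => simp [outP]
  | cons r0 t => simp [outP]; ring

-- A's fold over indices equals a fold over adjacent pairs
theorem foldA_pairs {σ : Type} (f : σ → Int → Int → σ) :
    ∀ (chain : List Int) (init : σ),
      (List.range (chain.length - 1)).foldl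
          (fun st k => f st (chain.getD k 0) (chain.getD (k + 1) 0)) init
        = (chain.zip chain.tail).foldl (fun st p => f st p.1 p.2) init := by
  intro chain
  induction chain with
  | nil => intro init; simp
  | cons a t ih =>
    intro init
    cases t with
    | nil => simp
    | cons b t' =>
      have hlen : (a :: b :: t').length - 1 = (t'.length + 1) := by simp
      rw [hlen, List.range_succ_eq_map, List.foldl_cons, List.foldl_map]
      simp only [List.getD_cons_zero, List.getD_cons_succ]
      exact ih (f init a b)

-- loop invariant: A's finished value equals outP of B's runs
theorem loop_inv : ∀ (rest : List Int) (c : Int) (result : List Int) (start : Int)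
    (rs : List (List Int)) (r : List Int), r ≠ [] → r.getLastD 0 = c →
    result = outP rs → start = (if rs = [] then 0 else r.headD 0) →
    (foldAp ((c :: rest).zip rest) (result, start)).1
        ++ [(c :: rest).getLastD 0 + 1 - (foldAp ((c :: rest).zip rest) (result, start)).2]
      = outP (foldB ((c :: rest).zip rest) (rs ++ [r])) := by
  intro rest
  induction rest with
  | nil =>
    intro c result start rs r hr hlast hres hstart
    simp only [List.zip_nil_right, foldAp, foldB, List.foldl_nil]
    rw [outP_concat, hlast, hres, hstart]
    simp [List.getLastD]
  | cons q rest' ih =>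
    intro c result start rs r hr hlast hres hstart
    simp only [List.zip_cons_cons, foldAp, foldB, List.foldl_cons] at *
    by_cases h : q - c = 1
    · simp only [h, beq_self_eq_true, if_true]
      have h1 : (rs ++ [r]).dropLast ++ [(rs ++ [r]).getLastD [] ++ [q]]
          = rs ++ [r ++ [q]] := by simp
      rw [h1]
      have := ih q result start rs (r ++ [q]) (by simp) (by simp)
        hres (by rw [hstart]; cases r with | nil => exact absurd rfl hr | cons x xs => simp)
      simpa [foldAp, foldB] using this
    · have hb : (q - c == 1) = false := by simpa using h
      simp only [hb, if_false, Bool.false_eq_true]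
      have h2 : (rs ++ [r]) ++ [[q]] = (rs ++ [r]) ++ [[q]] := rfl
      have := ih q (result ++ [c + 1 - start]) q (rs ++ [r]) [q] (by simp) (by simp)
        (by rw [outP_concat, hlast, hres, hstart]) (by simp)
      simpa [foldAp, foldB] using this

theorem foldB_ne_nil : ∀ (pairs : List (Int × Int)) (init : List (List Int)), init ≠ [] →
    foldB pairs init ≠ [] := by
  intro pairs
  induction pairs with
  | nil => intro init h; simpa [foldB] using h
  | cons p ps ih =>
    intro init h
    simp only [foldB, List.foldl_cons]
    by_cases hc : p.2 - p.1 = 1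
    · exact ih _ (by simp [hc])
    · have hb : (p.2 - p.1 == 1) = false := by simpa using hc
      exact ih _ (by simp [hb])

theorem pyGetD_neg_one_eq_getLastD (r : List Int) :
    PySem.List.pyGetD r (-1) 0 = r.getLastD 0 := by
  cases r with
  | nil => simp [PySem.List.pyGetD, PySem.List.pyGet?]
  | cons x xs =>
    rw [PySem.List.pyGetD_neg_one (x :: xs) 0 (List.cons_ne_nil x xs),
      List.getLastD_eq_getLast?, List.getLast?_eq_some_getLast (List.cons_ne_nil x xs)]
    rfl

-- ===== VERDICT (by name: the statement is the Claim_ definition above) =====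
theorem identify_sub_chains_spec : Claim_equal_identify_sub_chains := by
  intro chain _ hpre
  unfold Spec_identify_sub_chains
  match chain with
  | [] => exact absurd rfl hpre
  | c :: rest =>
    show identify_sub_chains (c :: rest) = _
    unfold identify_sub_chains identify_sub_chains_alt
    simp only []
    -- rewrite A's range fold into the pair fold
    have ht : (PySem.List.len (c :: rest) - 1 - 0).toNat = (c :: rest).length - 1 := by
      simp [PySem.List.len]
    have hrange : PySem.List.pyRange 0 (PySem.List.len (c :: rest) - 1) 1
        = (List.range ((c :: rest).length - 1)).map (fun k : Nat => (k : Int)) := by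
      rw [PySem.List.pyRange_one, ht]
      simp
    rw [hrange, List.foldl_map]
    rw [PySem.List.foldl_congr_mem _ _
      (fun (st : List Int × Int) (k : Nat) =>
        if (c :: rest).getD (k + 1) 0 - (c :: rest).getD k 0 == 1 then st
        else (st.1 ++ [(c :: rest).getD k 0 + 1 - st.2], (c :: rest).getD (k + 1) 0)) _
      (by
        intro st k _
        have h2 : ((k : Int) + 1) = ((k + 1 : Nat) : Int) := by push_cast; ring
        rw [h2, PySem.List.pyGetD_natCast, PySem.List.pyGetD_natCast])]
    rw [foldA_pairs (fun st p q => if q - p == 1 then st else (st.1 ++ [p + 1 - st.2], q))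
        (c :: rest) ([], 0)]
    have htail : (c :: rest).tail = rest := rfl
    rw [htail]
    have hlast : PySem.List.pyGetD (c :: rest) (-1) 0 = (c :: rest).getLastD 0 :=
      pyGetD_neg_one_eq_getLastD _
    rw [hlast]
    have hinv := loop_inv rest c [] 0 [] [c] (by simp) (by simp) rfl (by simp)
    simp only [List.nil_append] at hinv
    rw [show (foldAp ((c :: rest).zip rest) ([], 0)) =
        ((c :: rest).zip rest).foldl
          (fun st p => if p.2 - p.1 == 1 then st else (st.1 ++ [p.1 + 1 - st.2], p.2)) ([], 0)
      from rfl] at hinv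
    rw [hinv]
    -- B's output equals outP of its runs
    set runs := ((c :: rest).zip rest).foldl
      (fun (runs : List (List Int)) pq =>
        if pq.2 - pq.1 == 1 then runs.dropLast ++ [runs.getLastD [] ++ [pq.2]]
        else runs ++ [[pq.2]]) [[c]] with hruns
    have hfb : foldB ((c :: rest).zip rest) [[c]] = runs := rfl
    rw [hfb]
    have hne : runs ≠ [] := by rw [← hfb]; exact foldB_ne_nil _ _ (by simp)
    match hm : runs with
    | [] => exact absurd rfl hne
    | r0 :: t =>
      simp only [outP, List.headD_cons, List.drop_one, List.tail_cons]
      rw [pyGetD_neg_one_eq_getLastD]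
      congr 1
      apply List.map_congr_left
      intro r _
      rw [pyGetD_neg_one_eq_getLastD, PySem.List.pyGetD_zero]
      cases r <;> rfl
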